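-- pv_equiv track=rewrite | github.com/Wynblu/UBS-Coding-Challenge | routes/clumsy.py | correct_mistypes
-- ===== SOURCE A (Python) =====
-- from collections import defaultdict
--
-- def generate_mistyped_variants(word):
--     """Generate all possible mistyped variants of the given word by changing one character."""
--     letters = 'abcdefghijklmnopqrstuvwxyz'
--     variants = set()
--
--     for i in range(len(word)):
--         for letter in letters:
--             if word[i] != letter:
--                 variant = word[:i] + letter + word[i+1:]
--                 variants.add(variant)
--
--     return variants
--
-- def correct_mistypes(dictionary, mistypes):
--     """Correct mistyped words based on the dictionary."""
--     # Create a mapping from mistyped variants to the correct words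
--     mistyped_to_correct = defaultdict(list)
--
--     for word in dictionary:
--         for mistyped_variant in generate_mistyped_variants(word):
--             mistyped_to_correct[mistyped_variant].append(word)
--
--     corrections = []
--
--     for mistyped in mistypes:
--         # Find the correct word corresponding to the mistyped word
--         correct_words = mistyped_to_correct.get(mistyped, [])
--         corrections.append(correct_words[0] if correct_words else mistyped)  # Append the first correct word or original if none found
--
--     return corrections
-- ===== SOURCE B (Python) =====
-- def _is_correction(word, mistyped):
--     """True iff mistyped is word with exactly one character replaced by a
--     (different) lowercase letter a-z."""
--     if len(word) != len(mistyped):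
--         return False
--     diffs = [i for i in range(len(word)) if word[i] != mistyped[i]]
--     return len(diffs) == 1 and 'a' <= mistyped[diffs[0]] <= 'z'
--
-- def correct_mistypes(dictionary, mistypes):
--     """Correct mistyped words based on the dictionary."""
--     return [next((w for w in dictionary if _is_correction(w, m)), m)
--             for m in mistypes]
-- ===== Notes on version B (the rewrite author's own statement) =====
-- stated objective: simpler
-- what changed: B drops A's precomputed defaultdict of every one-letter variant of every dictionary word and instead, per mistype, scans the dictionary in order for the first word of equal length differing in exactly one position whose mistyped character is a lowercase letter.
import Mathlib
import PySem

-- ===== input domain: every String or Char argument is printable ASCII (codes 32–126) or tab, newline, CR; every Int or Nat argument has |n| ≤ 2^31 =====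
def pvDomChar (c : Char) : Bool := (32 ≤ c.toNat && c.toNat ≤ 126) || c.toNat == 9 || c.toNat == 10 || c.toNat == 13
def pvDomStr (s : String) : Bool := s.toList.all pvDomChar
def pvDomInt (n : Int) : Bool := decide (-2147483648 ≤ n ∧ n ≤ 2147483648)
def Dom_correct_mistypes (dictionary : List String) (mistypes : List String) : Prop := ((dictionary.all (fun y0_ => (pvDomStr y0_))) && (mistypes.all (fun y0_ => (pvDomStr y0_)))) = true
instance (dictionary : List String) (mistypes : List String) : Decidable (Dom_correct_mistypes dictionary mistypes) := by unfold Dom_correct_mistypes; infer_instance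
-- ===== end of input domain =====

-- B replaces A's precomputed table of all one-letter variants of every dictionary word
-- by a direct first-match scan of the dictionary per mistype (objective: simpler).

-- ===== PORT A =====
-- A's constant `letters = 'abcdefghijklmnopqrstuvwxyz'`
def pvLetters : List Char :=
  ['a','b','c','d','e','f','g','h','i','j','k','l','m',
   'n','o','p','q','r','s','t','u','v','w','x','y','z']

-- generate_mistyped_variants (word[i] is always in range here; Python's 1-char
-- strings word[i] and letter are represented as Char)
def generate_mistyped_variants (word : String) : PySem.Set String :=
  (PySem.List.pyRange 0 (PySem.Str.len word)).foldl (fun variants i =>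
    pvLetters.foldl (fun variants letter =>
      if PySem.Str.pyGet? word i ≠ some letter then
        variants.add (PySem.Str.slice word none (some i) ++ String.singleton letter ++
          PySem.Str.slice word (some (i + 1)) none)
      else variants) variants) (PySem.Set.ofList [])

-- A's local `mistyped_to_correct` (the defaultdict-building loop), as a named helper
def pvBuildDict (dictionary : List String) : PySem.Dict String (List String) :=
  dictionary.foldl (fun d word =>
    (generate_mistyped_variants word).foldl (fun d v =>
      d.insert v (d.getD v [] ++ [word])) d) PySem.Dict.empty

def correct_mistypes (dictionary : List String) (mistypes : List String) : List String :=
  mistypes.foldl (fun corrections mistyped =>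
    corrections ++ [match (pvBuildDict dictionary).getD mistyped [] with
                    | [] => mistyped
                    | w :: _ => w]) []

-- ===== PORT B =====
-- _is_correction of Source B (indices from range(len(word)) are in range, so getD is exact)
def pvIsCorrection (word mistyped : List Char) : Bool :=
  if word.length = mistyped.length then
    match (List.range word.length).filter
        (fun i => word.getD i ' ' ≠ mistyped.getD i ' ') with
    | [i] => decide ('a' ≤ mistyped.getD i ' ') && decide (mistyped.getD i ' ' ≤ 'z')
    | _ => false
  else false

def correct_mistypes_alt (dictionary : List String) (mistypes : List String) : List String :=
  mistypes.map (fun m =>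
    match dictionary.find? (fun w => pvIsCorrection w.toList m.toList) with
    | some w => w
    | none => m)

-- ===== PRECONDITION & SPEC =====
def Spec_correct_mistypes (dictionary : List String) (mistypes : List String) (out : List String) : Prop := out = correct_mistypes_alt dictionary mistypes
instance (dictionary : List String) (mistypes : List String) (out : List String) : Decidable (Spec_correct_mistypes dictionary mistypes out) := by unfold Spec_correct_mistypes; infer_instance

-- ===== CLAIM (what is proved, stated in full; the proofs are below) =====
def Claim_equal_correct_mistypes : Prop := ∀ (dictionary : List String) (mistypes : List String), Dom_correct_mistypes dictionary mistypes → Spec_correct_mistypes dictionary mistypes (correct_mistypes dictionary mistypes)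

-- ===== LEMMAS AND PROOFS =====

lemma char_le_iff (a b : Char) : a ≤ b ↔ a.toNat ≤ b.toNat := by
  rw [Char.le_def, UInt32.le_iff_toNat_le]; rfl

lemma char_eq_iff (a b : Char) : a = b ↔ a.toNat = b.toNat := by
  constructor
  · rintro rfl; rfl
  · intro h; exact Char.ext (UInt32.toNat_inj.mp h)

lemma mem_pvLetters (c : Char) : c ∈ pvLetters ↔ ('a' ≤ c ∧ c ≤ 'z') := by
  simp only [pvLetters, List.mem_cons, List.not_mem_nil, or_false,
    char_eq_iff, char_le_iff]
  simp only [show ('a':Char).toNat = 97 from rfl, show ('b':Char).toNat = 98 from rfl, show ('c':Char).toNat = 99 from rfl, show ('d':Char).toNat = 100 from rfl, show ('e':Char).toNat = 101 from rfl, show ('f':Char).toNat = 102 from rfl, show ('g':Char).toNat = 103 from rfl, show ('h':Char).toNat = 104 from rfl, show ('i':Char).toNat = 105 from rfl, show ('j':Char).toNat = 106 from rfl, show ('k':Char).toNat = 107 from rfl, show ('l':Char).toNat = 108 from rfl, show ('m':Char).toNat = 109 from rfl, show ('n':Char).toNat = 110 from rfl, show ('o':Char).toNat = 111 from rfl, show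 ('p':Char).toNat = 112 from rfl, show ('q':Char).toNat = 113 from rfl, show ('r':Char).toNat = 114 from rfl, show ('s':Char).toNat = 115 from rfl, show ('t':Char).toNat = 116 from rfl, show ('u':Char).toNat = 117 from rfl, show ('v':Char).toNat = 118 from rfl, show ('w':Char).toNat = 119 from rfl, show ('x':Char).toNat = 120 from rfl, show ('y':Char).toNat = 121 from rfl, show ('z':Char).toNat = 122 from rfl]
  omega

-- the one-character replacement A builds, read on the char-list side
lemma variant_toList (w : String) (i : Nat) (hi : i < w.toList.length) (c : Char) :
    (PySem.Str.slice w none (some (i : Int)) ++ String.singleton c ++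
      PySem.Str.slice w (some ((i : Int) + 1)) none).toList = w.toList.set i c := by
  simp only [String.toList_append, String.toList_singleton, PySem.Str.toList_slice,
    PySem.Chars.slice_eq_listSlice]
  rw [PySem.List.slice_to _ (by positivity),
    show ((i : Int) + 1) = ((i + 1 : Nat) : Int) by push_cast; ring,
    PySem.List.slice_from _ (by positivity), Int.toNat_natCast, Int.toNat_natCast,
    List.set_eq_take_cons_drop c hi]
  simp

lemma pyGet_ne_iff (w : String) (i : Nat) (hi : i < w.toList.length) (c : Char) :
    (PySem.Str.pyGet? w (i : Int) ≠ some c) ↔ w.toList.getD i ' ' ≠ c := by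
  rw [PySem.Str.pyGet?_natCast, List.getElem?_eq_getElem hi, List.getD_eq_getElem _ ' ' hi]
  simp

-- membership in the inner letters-fold of generate_mistyped_variants
lemma mem_inner_fold (w m : String) (i : Nat) (hi : i < w.toList.length) :
    ∀ (cs : List Char) (vs : PySem.Set String),
      m ∈ cs.foldl (fun variants letter =>
        if PySem.Str.pyGet? w (i : Int) ≠ some letter then
          variants.add (PySem.Str.slice w none (some (i : Int)) ++ String.singleton letter ++
            PySem.Str.slice w (some ((i : Int) + 1)) none)
        else variants) vs ↔
      m ∈ vs ∨ ∃ c ∈ cs, w.toList.getD i ' ' ≠ c ∧ m.toList = w.toList.set i c := by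
  have hvar : ∀ c : Char,
      m = PySem.Str.slice w none (some (i : Int)) ++ String.singleton c ++
        PySem.Str.slice w (some ((i : Int) + 1)) none ↔ m.toList = w.toList.set i c := by
    intro c
    rw [String.ext_iff, variant_toList w i hi c]
  intro cs
  induction cs with
  | nil => intro vs; simp
  | cons c cs ih =>
    intro vs
    rw [List.foldl_cons]
    by_cases hc : PySem.Str.pyGet? w (i : Int) ≠ some c
    · rw [if_pos hc, ih, PySem.Set.mem_add]
      have hc' : w.toList.getD i ' ' ≠ c := (pyGet_ne_iff w i hi c).mp hc
      constructor
      · rintro (⟨h | h⟩ | ⟨d, hd, hne, hm⟩)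
        · exact Or.inl h
        · exact Or.inr ⟨c, List.mem_cons_self, hc', (hvar c).mp h⟩
        · exact Or.inr ⟨d, List.mem_cons_of_mem _ hd, hne, hm⟩
      · rintro (h | ⟨d, hd, hne, hm⟩)
        · exact Or.inl (Or.inl h)
        · rcases List.mem_cons.mp hd with rfl | hd
          · exact Or.inl (Or.inr ((hvar d).mpr hm))
          · exact Or.inr ⟨d, hd, hne, hm⟩
    · rw [if_neg hc, ih]
      have hc' : w.toList.getD i ' ' = c := by
        have := (pyGet_ne_iff w i hi c).not.mp hc
        rwa [not_not] at this
      constructor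
      · rintro (h | ⟨d, hd, hne, hm⟩)
        · exact Or.inl h
        · exact Or.inr ⟨d, List.mem_cons_of_mem _ hd, hne, hm⟩
      · rintro (h | ⟨d, hd, hne, hm⟩)
        · exact Or.inl h
        · rcases List.mem_cons.mp hd with rfl | hd
          · exact absurd hc' hne
          · exact Or.inr ⟨d, hd, hne, hm⟩

lemma mem_gen (w m : String) :
    m ∈ generate_mistyped_variants w ↔
      ∃ i < w.toList.length, ∃ c, c ∈ pvLetters ∧
        w.toList.getD i ' ' ≠ c ∧ m.toList = w.toList.set i c := by
  unfold generate_mistyped_variants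
  rw [PySem.Str.len_eq, PySem.List.pyRange_zero_natCast, List.foldl_map]
  have key : ∀ (is : List Nat), (∀ i ∈ is, i < w.toList.length) →
      ∀ (vs : PySem.Set String),
      m ∈ is.foldl (fun variants (i : Nat) =>
        pvLetters.foldl (fun variants letter =>
          if PySem.Str.pyGet? w (i : Int) ≠ some letter then
            variants.add (PySem.Str.slice w none (some (i : Int)) ++ String.singleton letter ++
              PySem.Str.slice w (some ((i : Int) + 1)) none)
          else variants) variants) vs ↔
      m ∈ vs ∨ ∃ i ∈ is, ∃ c, c ∈ pvLetters ∧
        w.toList.getD i ' ' ≠ c ∧ m.toList = w.toList.set i c := by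
    intro is
    induction is with
    | nil => intro _ vs; simp
    | cons i is ih =>
      intro hlt vs
      simp only [List.foldl_cons]
      rw [ih (fun j hj => hlt j (List.mem_cons_of_mem _ hj)),
        mem_inner_fold w m i (hlt i List.mem_cons_self)]
      constructor
      · rintro ((h | ⟨c, hc, hne, hm⟩) | ⟨j, hj, c, hc, hne, hm⟩)
        · exact Or.inl h
        · exact Or.inr ⟨i, List.mem_cons_self, c, hc, hne, hm⟩
        · exact Or.inr ⟨j, List.mem_cons_of_mem _ hj, c, hc, hne, hm⟩
      · rintro (h | ⟨j, hj, c, hc, hne, hm⟩)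
        · exact Or.inl (Or.inl h)
        · rcases List.mem_cons.mp hj with rfl | hj
          · exact Or.inl (Or.inr ⟨c, hc, hne, hm⟩)
          · exact Or.inr ⟨j, hj, c, hc, hne, hm⟩
  rw [key (List.range w.toList.length) (fun i hi => List.mem_range.mp hi)]
  simp [List.mem_range]

-- the variant set is duplicate-free (Python set semantics)
lemma foldl_nodup {α β : Type} (f : List α → β → List α)
    (hf : ∀ s x, s.Nodup → (f s x).Nodup) :
    ∀ (l : List β) (s : List α), s.Nodup → (l.foldl f s).Nodup := by
  intro l
  induction l with
  | nil => intro s hs; exact hs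
  | cons x l ih => intro s hs; exact ih _ (hf s x hs)

lemma gen_nodup (w : String) : (generate_mistyped_variants w).Nodup := by
  unfold generate_mistyped_variants
  refine foldl_nodup _ ?_ _ _ (PySem.Set.nodup_ofList [])
  intro s i hs
  refine foldl_nodup _ ?_ _ _ hs
  intro s c hs
  split
  · exact PySem.Set.nodup_add _ _ hs
  · exact hs

lemma isCorrection_iff (w m : List Char) :
    pvIsCorrection w m = true ↔
      ∃ i < w.length, ∃ c, c ∈ pvLetters ∧ w.getD i ' ' ≠ c ∧ m = w.set i c := by
  unfold pvIsCorrection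
  split_ifs with hlen
  · constructor
    · intro h
      rcases hr : (List.range w.length).filter
          (fun i => decide (w.getD i ' ' ≠ m.getD i ' ')) with _ | ⟨i, _ | ⟨j, t⟩⟩ <;>
        rw [hr] at h
      · simp at h
      · -- singleton filter: the unique differing index
        have hi : i < w.length := by
          have := List.mem_of_mem_filter (p := fun i => decide (w.getD i ' ' ≠ m.getD i ' '))
            (l := List.range w.length) (a := i) (by rw [hr]; exact List.mem_cons_self)
          exact List.mem_range.mp this
        have hpi : w.getD i ' ' ≠ m.getD i ' ' := by
          have := List.of_mem_filter (p := fun i => decide (w.getD i ' ' ≠ m.getD i ' '))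
            (by rw [hr]; exact List.mem_cons_self)
          simpa using this
        have hothers : ∀ j < w.length, j ≠ i → w.getD j ' ' = m.getD j ' ' := by
          intro j hj hne
          by_contra hcon
          have : j ∈ (List.range w.length).filter
              (fun i => decide (w.getD i ' ' ≠ m.getD i ' ')) := by
            exact List.mem_filter.mpr ⟨List.mem_range.mpr hj, by simpa using hcon⟩
          rw [hr] at this
          simp at this
          exact hne this
        refine ⟨i, hi, m.getD i ' ', ?_, hpi, ?_⟩
        · rw [mem_pvLetters]
          simp only [Bool.and_eq_true, decide_eq_true_eq] at h
          exact h
        · -- m = w.set i (m[i])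
          apply List.ext_getElem
          · rw [List.length_set]; omega
          · intro j hj hj'
            rw [List.length_set] at hj'
            rcases eq_or_ne j i with rfl | hne
            · rw [List.getElem_set_self]
              rw [List.getD_eq_getElem m ' ' (by omega)]
            · rw [List.getElem_set_ne (by omega)]
              have := hothers j hj' (by omega)
              rw [List.getD_eq_getElem w ' ' hj', List.getD_eq_getElem m ' ' (by omega)] at this
              exact this.symm
      · simp at h
    · rintro ⟨i, hi, c, hc, hne, rfl⟩
      have hfilter : (List.range w.length).filter
          (fun j => decide (w.getD j ' ' ≠ (w.set i c).getD j ' ')) = [i] := by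
        rw [List.filter_congr (q := fun j => j == i) ?_]
        · rw [List.filter_beq, List.count_range, if_pos hi]
          rfl
        · intro j hj
          have hjlt := List.mem_range.mp hj
          show decide (w.getD j ' ' ≠ (w.set i c).getD j ' ') = (j == i)
          rcases eq_or_ne j i with rfl | hne'
          · simp only [beq_self_eq_true]
            rw [List.getD_eq_getElem w ' ' hjlt,
              List.getD_eq_getElem _ ' ' (by rw [List.length_set]; omega),
              List.getElem_set_self]
            rw [List.getD_eq_getElem w ' ' hjlt] at hne
            simpa using hne
          · have hbeq : (j == i) = false := by simpa using hne'
            rw [hbeq]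
            rw [List.getD_eq_getElem w ' ' hjlt,
              List.getD_eq_getElem _ ' ' (by rw [List.length_set]; omega),
              List.getElem_set_ne (by omega)]
            simp
      rw [hfilter]
      have hgi : (w.set i c).getD i ' ' = c := by
        rw [List.getD_eq_getElem _ ' ' (by rw [List.length_set]; omega), List.getElem_set_self]
      rw [mem_pvLetters] at hc
      simp only [List.getD] at hgi
      simp [hgi, hc.1, hc.2]
  · constructor
    · intro h; simp at h
    · rintro ⟨i, hi, c, hc, hne, rfl⟩
      exact absurd List.length_set.symm hlen

-- the dictionary fold: value stored under `key` is the list of dictionary words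
-- having `key` among their variants, in dictionary order
lemma inner_dict (word : String) (key : String) :
    ∀ (vs : List String), vs.Nodup → ∀ (d : PySem.Dict String (List String)),
      (vs.foldl (fun d v => d.insert v (d.getD v [] ++ [word])) d).getD key [] =
        d.getD key [] ++ (if key ∈ vs then [word] else []) := by
  intro vs
  induction vs with
  | nil => intro _ d; simp
  | cons v vs ih =>
    intro hnd d
    rw [List.nodup_cons] at hnd
    obtain ⟨hv, hnd⟩ := hnd
    simp only [List.foldl_cons]
    rw [ih hnd]
    rw [PySem.Dict.getD_insert]
    rcases eq_or_ne key v with rfl | hne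
    · rw [if_pos rfl, if_neg (by simpa using hv), if_pos List.mem_cons_self]
      simp
    · rw [if_neg hne]
      rcases em (key ∈ vs) with h | h
      · rw [if_pos h, if_pos (List.mem_cons_of_mem _ h)]
      · rw [if_neg h, if_neg (by simp [hne, h])]

lemma outer_dict (key : String) :
    ∀ (ws : List String) (d : PySem.Dict String (List String)),
      (ws.foldl (fun d word =>
        (generate_mistyped_variants word).foldl (fun d v =>
          d.insert v (d.getD v [] ++ [word])) d) d).getD key [] =
      d.getD key [] ++
        ws.filter (fun word => decide (key ∈ generate_mistyped_variants word)) := by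
  intro ws
  induction ws with
  | nil => intro d; simp
  | cons word ws ih =>
    intro d
    simp only [List.foldl_cons]
    rw [ih, inner_dict word key _ (gen_nodup word)]
    rcases em (key ∈ generate_mistyped_variants word) with h | h
    · rw [if_pos h, List.filter_cons_of_pos (by simpa using h), List.append_assoc]
      simp
    · rw [if_neg h, List.filter_cons_of_neg (by simpa using h)]
      simp

lemma getD_empty (key : String) :
    (PySem.Dict.empty : PySem.Dict String (List String)).getD key [] = [] := by
  simp [PySem.Dict.getD, PySem.Dict.get?, PySem.Dict.empty]

lemma buildDict_getD (dictionary : List String) (key : String) :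
    (pvBuildDict dictionary).getD key [] =
      dictionary.filter (fun word => decide (key ∈ generate_mistyped_variants word)) := by
  unfold pvBuildDict
  rw [outer_dict, getD_empty, List.nil_append]

-- ===== VERDICT (by name: the statement is the Claim_ definition above) =====
theorem correct_mistypes_spec : Claim_equal_correct_mistypes := by
  unfold Claim_equal_correct_mistypes Spec_correct_mistypes
  intro dictionary mistypes _
  unfold correct_mistypes correct_mistypes_alt
  have hmap := PySem.List.foldl_append_singleton_eq_map
    (fun mistyped => match (pvBuildDict dictionary).getD mistyped [] with
      | [] => mistyped
      | w :: _ => w) mistypes []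
  rw [List.nil_append] at hmap
  rw [hmap]
  apply List.map_congr_left
  intro m _
  rw [buildDict_getD]
  have hpq : ∀ w : String,
      decide (m ∈ generate_mistyped_variants w) = pvIsCorrection w.toList m.toList := by
    intro w
    rw [Bool.eq_iff_iff, decide_eq_true_eq, mem_gen, isCorrection_iff]
  simp only [hpq]
  rw [← List.head?_filter]
  cases hfd : dictionary.filter (fun w => pvIsCorrection w.toList m.toList) with
  | nil => rfl
  | cons w t => rfl
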